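-- pv_equiv track=rewrite | github.com/tatianno/ami-data-parser | ami_data_parser/parser/queue_parser.py | _get_list_queue_lines
-- ===== SOURCE A (Python) =====
-- def _get_list_queue_lines(lines: list) -> list:
--     data = []
--     actual_list = None
--
--     for line in lines:
--         if 'Output:' in line:
--             if 'strategy' in line:
--                 if actual_list:
--                     data.append(actual_list)
--
--                 actual_list = []
--
--             actual_list.append(line)
--
--     if actual_list:
--         data.append(actual_list)
--
--     return data
-- ===== SOURCE B (Python) =====
-- def _get_list_queue_lines(lines: list) -> list:
--     relevant = [line for line in lines if 'Output:' in line]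
--     marks = [i for i, line in enumerate(relevant) if 'strategy' in line]
--     return [relevant[s:e] for s, e in zip(marks, marks[1:] + [len(relevant)])]
-- ===== Notes on version B (the rewrite author's own statement) =====
-- stated objective: alternative
-- what changed: B computes the index positions of the 'strategy' marker lines within the filtered 'Output:' lines and returns the slices between consecutive marker boundaries, instead of A's stateful single-pass accumulation with a None sentinel.
import Mathlib
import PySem

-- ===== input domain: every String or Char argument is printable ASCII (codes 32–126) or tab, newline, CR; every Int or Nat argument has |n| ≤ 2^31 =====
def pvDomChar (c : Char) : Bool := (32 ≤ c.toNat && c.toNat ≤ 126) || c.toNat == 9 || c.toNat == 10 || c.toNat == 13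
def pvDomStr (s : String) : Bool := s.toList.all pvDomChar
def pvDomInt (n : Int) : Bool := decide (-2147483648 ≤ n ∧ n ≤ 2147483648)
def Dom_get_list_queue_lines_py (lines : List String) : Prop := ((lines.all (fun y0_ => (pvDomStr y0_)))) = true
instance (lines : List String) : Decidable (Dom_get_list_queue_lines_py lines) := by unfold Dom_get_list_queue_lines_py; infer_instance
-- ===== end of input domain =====

-- B computes marker index positions in the filtered 'Output:' lines and slices between consecutive boundaries, instead of A's stateful accumulation scan (alternative decomposition, same cost).


-- ===== PORT A =====
-- state: (data, actual_list); actual_list = none models Python's None.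
-- In the branch where Python would call None.append (excluded by Pre_), the port leaves the state unchanged.
def pvStepA (st : List (List String) × Option (List String)) (line : String) :
    List (List String) × Option (List String) :=
  if PySem.Str.isIn "Output:" line then
    if PySem.Str.isIn "strategy" line then
      (match st.2 with
       | some g => if g ≠ [] then st.1 ++ [g] else st.1
       | none => st.1, some [line])
    else
      match st.2 with
      | some g => (st.1, some (g ++ [line]))
      | none => (st.1, none)  -- Python raises AttributeError here (outside Pre_)
  else st

-- the trailing 'if actual_list: data.append(actual_list)'
def pvFinishA (st : List (List String) × Option (List String)) : List (List String) :=
  match st.2 with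
  | some g => if g ≠ [] then st.1 ++ [g] else st.1
  | none => st.1

def get_list_queue_lines_py (lines : List String) : List (List String) :=
  pvFinishA (lines.foldl pvStepA ([], none))

-- ===== PORT B =====
def get_list_queue_lines_py_alt (lines : List String) : List (List String) :=
  let relevant := lines.filter (fun line => PySem.Str.isIn "Output:" line)
  let marks := ((PySem.List.enumerate relevant 0).filter
      (fun p => PySem.Str.isIn "strategy" p.2)).map (fun p => p.1)
  (List.zip marks (marks.drop 1 ++ [(relevant.length : Int)])).map
    (fun se => PySem.List.slice relevant (some se.1) (some se.2))

-- ===== PRECONDITION & SPEC =====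
-- Pre_ excludes exactly the inputs on which A raises AttributeError: those whose first
-- 'Output:'-containing line does not contain 'strategy' (append on None).
def Pre_get_list_queue_lines_py (lines : List String) : Prop :=
  ((lines.filter (fun line => PySem.Str.isIn "Output:" line)).head?.all
    (fun line => PySem.Str.isIn "strategy" line)) = true
instance (lines : List String) : Decidable (Pre_get_list_queue_lines_py lines) := by
  unfold Pre_get_list_queue_lines_py; infer_instance

def pvWitness_get_list_queue_lines_py : List String :=
  ["Output: Queue strategy: ringall", "Output: member one", "junk"]

def Spec_get_list_queue_lines_py (lines : List String) (out : List (List String)) : Prop :=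
  out = get_list_queue_lines_py_alt lines
instance (lines : List String) (out : List (List String)) :
    Decidable (Spec_get_list_queue_lines_py lines out) := by
  unfold Spec_get_list_queue_lines_py; infer_instance

-- ===== CLAIM (what is proved, stated in full; the proofs are below) =====
def Claim_equal_get_list_queue_lines_py : Prop :=
  ∀ (lines : List String), Dom_get_list_queue_lines_py lines →
    Pre_get_list_queue_lines_py lines →
    Spec_get_list_queue_lines_py lines (get_list_queue_lines_py lines)

-- ===== LEMMAS AND PROOFS =====

def stratB (x : String) : Bool := PySem.Str.isIn "strategy" x

-- reference chunking: groups of A's scan once a group is open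
def chunkRec (g : List String) : List String → List (List String)
  | [] => [g]
  | x :: t => if stratB x then g :: chunkRec [x] t else chunkRec (g ++ [x]) t

-- nat-level marker positions
def natMarks : List String → List Nat
  | [] => []
  | x :: t => (if stratB x then [0] else []) ++ (natMarks t).map (· + 1)

-- nat-level form of B's slice expression
def sliceGroupsN (rel : List String) : List (List String) :=
  ((natMarks rel).zip ((natMarks rel).drop 1 ++ [rel.length])).map
    (fun se => (rel.drop se.1).take (se.2 - se.1))


theorem chunkRec_cons_pos (g : List String) (x : String) (t : List String)
    (hx : stratB x = true) : chunkRec g (x :: t) = g :: chunkRec [x] t := by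
  rw [chunkRec, if_pos hx]

theorem chunkRec_cons_neg (g : List String) (x : String) (t : List String)
    (hx : stratB x = false) : chunkRec g (x :: t) = chunkRec (g ++ [x]) t := by
  rw [chunkRec, if_neg (by simp [hx])]

theorem natMarks_cons_pos (x : String) (t : List String) (hx : stratB x = true) :
    natMarks (x :: t) = 0 :: (natMarks t).map (· + 1) := by
  rw [natMarks, if_pos hx]; rfl

theorem natMarks_cons_neg (x : String) (t : List String) (hx : stratB x = false) :
    natMarks (x :: t) = (natMarks t).map (· + 1) := by
  rw [natMarks, if_neg (by simp [hx])]; rfl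

theorem foldA_filter (lines : List String) (st : List (List String) × Option (List String)) :
    lines.foldl pvStepA st =
      (lines.filter (fun line => PySem.Str.isIn "Output:" line)).foldl pvStepA st := by
  induction lines generalizing st with
  | nil => rfl
  | cons l t ih =>
      rw [List.foldl_cons, List.filter_cons]
      by_cases h : PySem.Str.isIn "Output:" l = true
      · rw [if_pos h, List.foldl_cons]; exact ih _
      · rw [if_neg h, show pvStepA st l = st from by unfold pvStepA; rw [if_neg h]]
        exact ih st

theorem foldA_chunk (rel : List String)
    (hrel : ∀ l ∈ rel, PySem.Str.isIn "Output:" l = true) :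
    ∀ (data : List (List String)) (g : List String), g ≠ [] →
      pvFinishA (rel.foldl pvStepA (data, some g)) = data ++ chunkRec g rel := by
  induction rel with
  | nil => intro data g hg; simp [pvFinishA, chunkRec, hg]
  | cons x t ih =>
      intro data g hg
      have ho : PySem.Str.isIn "Output:" x = true := hrel x (List.mem_cons_self ..)
      have ht : ∀ l ∈ t, PySem.Str.isIn "Output:" l = true :=
        fun l hl => hrel l (List.mem_cons_of_mem _ hl)
      by_cases hs : PySem.Str.isIn "strategy" x = true
      · have hA : pvStepA (data, some g) x = (data ++ [g], some [x]) := by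
          unfold pvStepA; rw [if_pos ho, if_pos hs]; simp [hg]
        rw [List.foldl_cons, hA, ih ht (data ++ [g]) [x] (by simp),
          chunkRec_cons_pos g x t hs]
        simp
      · have hA : pvStepA (data, some g) x = (data, some (g ++ [x])) := by
          unfold pvStepA; rw [if_pos ho, if_neg hs]
        rw [List.foldl_cons, hA, ih ht data (g ++ [x]) (by simp),
          chunkRec_cons_neg g x t (by simpa using hs)]

theorem chunkRec_no_strat (t : List String) :
    ∀ g, (∀ x ∈ t, stratB x = false) → chunkRec g t = [g ++ t] := by
  induction t with
  | nil => intro g _; simp [chunkRec]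
  | cons x t ih =>
      intro g h
      have hx : stratB x = false := h x (List.mem_cons_self ..)
      rw [chunkRec, if_neg (by simp [hx]), ih _ (fun y hy => h y (List.mem_cons_of_mem _ hy))]
      simp

theorem chunkRec_append (pre : List String) :
    ∀ g x rest, (∀ y ∈ pre, stratB y = false) → stratB x = true →
      chunkRec g (pre ++ x :: rest) = (g ++ pre) :: chunkRec [x] rest := by
  induction pre with
  | nil => intro g x rest _ hx; simp [chunkRec, hx]
  | cons p pre ih =>
      intro g x rest h hx
      have hp : stratB p = false := h p (List.mem_cons_self ..)
      rw [List.cons_append, chunkRec, if_neg (by simp [hp]),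
        ih _ _ _ (fun y hy => h y (List.mem_cons_of_mem _ hy)) hx]
      simp

theorem enum_marks (rel : List String) :
    ∀ (s : Int),
      (((PySem.List.enumerate rel s).filter (fun p => PySem.Str.isIn "strategy" p.2)).map
          (fun p => p.1)) =
        (natMarks rel).map (fun (n : Nat) => s + (n : Int)) := by
  induction rel with
  | nil => intro s; simp [PySem.List.enumerate_nil, natMarks]
  | cons x t ih =>
      intro s
      rw [PySem.List.enumerate_cons, List.filter_cons]
      by_cases hx : PySem.Str.isIn "strategy" x = true
      · rw [if_pos (by simpa using hx)]
        rw [List.map_cons, ih (s + 1)]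
        rw [natMarks_cons_pos x t hx, List.map_cons, List.map_map]
        refine List.cons_eq_cons.mpr ⟨by simp, ?_⟩
        apply List.map_congr_left
        intro n _
        simp only [Function.comp_apply]
        push_cast
        ring
      · rw [if_neg (by simpa using hx)]
        rw [ih (s + 1)]
        rw [natMarks_cons_neg x t (by simpa using hx), List.map_map]
        apply List.map_congr_left
        intro n _
        simp only [Function.comp_apply]
        push_cast
        ring

theorem natMarks_append (pre : List String) :
    ∀ u, (∀ y ∈ pre, stratB y = false) →
      natMarks (pre ++ u) = (natMarks u).map (· + pre.length) := by
  induction pre with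
  | nil => intro u _; simp
  | cons p pre ih =>
      intro u h
      have hp : stratB p = false := h p (List.mem_cons_self ..)
      rw [List.cons_append, natMarks, if_neg (by simp [hp]),
        ih _ (fun y hy => h y (List.mem_cons_of_mem _ hy))]
      simp only [List.nil_append, List.map_map, List.length_cons]
      apply List.map_congr_left; intro n _; simp only [Function.comp_apply]; omega

theorem sliceGroupsN_chunk : ∀ (n : Nat) (t : List String) (l : String), t.length ≤ n →
    stratB l = true → sliceGroupsN (l :: t) = chunkRec [l] t := by
  intro n
  induction n with
  | zero =>
      intro t l hlen hl
      have : t = [] := List.eq_nil_of_length_eq_zero (Nat.le_zero.mp hlen)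
      subst this
      simp [sliceGroupsN, natMarks, hl, chunkRec]
  | succ n ih =>
      intro t l hlen hl
      rcases ht : t.dropWhile (fun x => !stratB x) with _ | ⟨x, r⟩
      · -- no marker in t
        have hsplit := List.takeWhile_append_dropWhile (p := fun x => !stratB x) (l := t)
        rw [ht, List.append_nil] at hsplit
        have hno : ∀ y ∈ t, stratB y = false := by
          intro y hy
          rw [← hsplit] at hy
          have := List.mem_takeWhile_imp hy
          simpa using this
        have hm : natMarks t = [] := by
          have := natMarks_append t [] hno
          simpa using this
        rw [chunkRec_no_strat t [l] hno]
        simp [sliceGroupsN, natMarks, hl, hm, List.take_of_length_le (le_refl _)]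
      · -- t = pre ++ x :: r with pre strategy-free, strat x
        set pre := t.takeWhile (fun x => !stratB x) with hpre
        have hsplit : pre ++ x :: r = t := by
          rw [hpre, ← ht]; exact List.takeWhile_append_dropWhile
        have hnopre : ∀ y ∈ pre, stratB y = false := by
          intro y hy
          have := List.mem_takeWhile_imp hy
          simpa using this
        have hx : stratB x = true := by
          have := List.head?_dropWhile_not (p := fun x => !stratB x) (l := t)
          rw [ht] at this
          simpa using this
        have hIH : sliceGroupsN (x :: r) = chunkRec [x] r := by
          apply ih r x _ hx
          have : pre.length + (r.length + 1) = t.length := by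
            rw [← hsplit]; simp
          omega
        rw [← hsplit, chunkRec_append pre [l] x r hnopre hx]
        -- now compute sliceGroupsN (l :: pre ++ x :: r)
        have hmt : natMarks (pre ++ x :: r) = (natMarks (x :: r)).map (· + pre.length) :=
          natMarks_append pre _ hnopre
        have hmx : natMarks (x :: r) = 0 :: (natMarks r).map (· + 1) := by
          simp [natMarks, hx]
        -- abbreviations
        set k := pre.length + 1 with hk
        have hmarks : natMarks (l :: (pre ++ x :: r)) =
            0 :: (natMarks (x :: r)).map (· + k) := by
          rw [natMarks_cons_pos l _ hl, hmt]
          simp only [List.map_map]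
          congr 1
        have hlen2 : (l :: (pre ++ x :: r)).length = (x :: r).length + k := by
          simp [hk]; omega
        rw [sliceGroupsN, hmarks, hmx]
        -- marks = 0 :: k :: (natMarks r).map (·+1+k) ; second list = tail ++ [len]
        simp only [List.map_cons, Nat.zero_add, List.drop_succ_cons, List.drop_zero]
        rw [hlen2]
        -- zip (0 :: k :: M') (k :: M' ++ [lenR + k])
        simp only [List.cons_append, List.zip_cons_cons, List.map_cons]
        have hhead : (((l :: (pre ++ x :: r)).drop 0).take (k - 0)) = l :: pre := by
          have : l :: (pre ++ x :: r) = (l :: pre) ++ (x :: r) := by simp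
          rw [this, List.drop_zero, Nat.sub_zero]
          have hlp : (l :: pre).length = k := by simp [hk]
          rw [← hlp, List.take_left]
        rw [hhead]
        congr 1
        -- tail: zip ((natMarks (x::r)).map (·+k)) (((natMarks r).map (·+1)).map (·+k) ++ [(x::r).length + k])
        rw [← hIH]
        rw [sliceGroupsN, hmx]
        simp only [List.drop_succ_cons, List.drop_zero]
        -- rewrite RHS-of-goal shape: both sides are maps over zips of mapped lists
        have hzip :
            List.zip (((natMarks (x :: r)).map (· + k)))
                ((((natMarks r).map (· + 1)).map (· + k)) ++ [(x :: r).length + k]) =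
              (List.zip (natMarks (x :: r)) ((natMarks r).map (· + 1) ++ [(x :: r).length])).map
                (fun se => (se.1 + k, se.2 + k)) := by
          have : (((natMarks r).map (· + 1)).map (· + k)) ++ [(x :: r).length + k] =
              ((natMarks r).map (· + 1) ++ [(x :: r).length]).map (· + k) := by
            simp
          rw [this, List.zip_map]
          rfl
        rw [hmx] at hzip
        simp only [List.map_cons, Nat.zero_add] at hzip
        rw [hzip, List.map_map]
        apply List.map_congr_left
        intro se _
        have hdrop : (l :: (pre ++ x :: r)).drop (se.1 + k) = (x :: r).drop se.1 := by
          have : l :: (pre ++ x :: r) = (l :: pre) ++ (x :: r) := by simp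
          rw [this]
          have hlp : (l :: pre).length = k := by simp [hk]
          rw [show se.1 + k = (l :: pre).length + se.1 by omega, List.drop_append,
            List.drop_eq_nil_of_le (Nat.le_add_right _ _), Nat.add_sub_cancel_left,
            List.nil_append]
        simp only [Function.comp_apply, hdrop]
        congr 1
        omega

-- B's port equals the nat-level slice form
theorem alt_eq_sliceGroupsN (lines : List String) :
    get_list_queue_lines_py_alt lines =
      sliceGroupsN (lines.filter (fun line => PySem.Str.isIn "Output:" line)) := by
  simp only [get_list_queue_lines_py_alt, sliceGroupsN]
  set rel := lines.filter (fun line => PySem.Str.isIn "Output:" line) with hrel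
  have hm : ((PySem.List.enumerate rel 0).filter
      (fun p => PySem.Str.isIn "strategy" p.2)).map (fun p => p.1) =
      (natMarks rel).map (fun (n : Nat) => (n : Int)) := by
    rw [enum_marks rel 0]; simp
  rw [hm]
  have h2 : ((natMarks rel).map (fun (n : Nat) => (n : Int))).drop 1 ++ [(rel.length : Int)] =
      ((natMarks rel).drop 1 ++ [rel.length]).map (fun (n : Nat) => (n : Int)) := by
    simp
  rw [h2, List.zip_map, List.map_map]
  apply List.map_congr_left
  intro se _
  simp only [Function.comp_apply, Prod.map_fst, Prod.map_snd]
  exact PySem.List.slice_natCast rel se.1 se.2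

-- ===== VERDICT (by name: the statement is the Claim_ definition above) =====
theorem get_list_queue_lines_py_spec : Claim_equal_get_list_queue_lines_py := by
  intro lines _ hpre
  unfold Spec_get_list_queue_lines_py
  rw [alt_eq_sliceGroupsN]
  unfold get_list_queue_lines_py
  rw [foldA_filter]
  cases hf : lines.filter (fun line => PySem.Str.isIn "Output:" line) with
  | nil => simp [pvFinishA, sliceGroupsN, natMarks]
  | cons l t =>
      have hall : ∀ x ∈ lines.filter (fun line => PySem.Str.isIn "Output:" line),
          PySem.Str.isIn "Output:" x = true := fun x hx => List.of_mem_filter hx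
      have ho : PySem.Str.isIn "Output:" l = true :=
        hall l (by rw [hf]; exact List.mem_cons_self ..)
      have ht : ∀ x ∈ t, PySem.Str.isIn "Output:" x = true := by
        intro x hx; exact hall x (by rw [hf]; exact List.mem_cons_of_mem _ hx)
      have hs : stratB l = true := by
        unfold Pre_get_list_queue_lines_py at hpre
        rw [hf] at hpre; simpa [stratB] using hpre
      have hA1 : pvStepA ([], none) l = ([], some [l]) := by
        unfold pvStepA
        rw [if_pos ho, if_pos (show PySem.Str.isIn "strategy" l = true from hs)]
      rw [List.foldl_cons, hA1, foldA_chunk t ht [] [l] (by simp),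
        sliceGroupsN_chunk t.length t l (le_refl _) hs]
      simp
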